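-- pv_equiv track=rewrite | github.com/alexbarashov/TesterSDR | beacon406/lib/demod.py | halfbits_to_bytes_
-- ===== SOURCE A (Python) =====
-- def halfbits_to_bytes_(half_bits):
--     """
--     half_bits : список из 0/1 (длина должна быть чётной).
--                 Каждая пара = 1 бит:
--                 [1,0] -> 1
--                 [0,1] -> 0
--
--     return    : список байтов (int), MSB-first
--     """
--     # Дополняем к последнему если длина нечетная
--     #if len(half_bits) % 2 != 0:
--     #    half_bits.append(1 - half_bits[-1])
--
--     # удаляем последний если длина нечетная
--     if len(half_bits) % 2 != 0:
--         half_bits.pop()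
--
--     # пары полубитов -> биты
--     bits = []
--     for i in range(0, len(half_bits), 2):
--         pair = half_bits[i:i+2]
--         if pair == [1, 0]:
--             bits.append("1")
--         elif pair == [0, 1]:
--             bits.append("0")
--         else:
--             raise ValueError(f"Недопустимая пара: {pair}")
--
--     # добивка до кратности 8
--     pad = (-len(bits)) % 8
--     bits = "0"*pad + "".join(bits)
--
--     # биты -> байты
--     out = []
--     for i in range(0, len(bits), 8):
--         out.append(int(bits[i:i+8], 2))
--     return out
-- ===== SOURCE B (Python) =====
-- def halfbits_to_bytes_(half_bits):
--     """Same decoding as A, but accumulates bits into one integer and emits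
--     bytes with int.to_bytes instead of building a padded bit-string and
--     re-parsing it in 8-char slices. Performs the same pop() mutation on
--     odd-length input; return-value equivalence is what is proved."""
--     if len(half_bits) % 2 != 0:
--         half_bits.pop()
--
--     value = 0
--     n = 0
--     it = iter(half_bits)
--     for a, b in zip(it, it):
--         if a == 1 and b == 0:
--             value = value * 2 + 1
--         elif a == 0 and b == 1:
--             value = value * 2
--         else:
--             raise ValueError(f"Недопустимая пара: {[a, b]}")
--         n += 1
--
--     return list(value.to_bytes((n + 7) // 8, "big"))
-- ===== Notes on version B (the rewrite author's own statement) =====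
-- stated objective: simpler
-- what changed: A appends '1'/'0' characters to a list, joins them into a zero-padded bit-string and re-parses it in a second 8-character slicing loop with int(.,2); B folds each decoded bit directly into one integer accumulator in a single pass and emits the bytes with int.to_bytes((n+7)//8,'big').
import Mathlib
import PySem

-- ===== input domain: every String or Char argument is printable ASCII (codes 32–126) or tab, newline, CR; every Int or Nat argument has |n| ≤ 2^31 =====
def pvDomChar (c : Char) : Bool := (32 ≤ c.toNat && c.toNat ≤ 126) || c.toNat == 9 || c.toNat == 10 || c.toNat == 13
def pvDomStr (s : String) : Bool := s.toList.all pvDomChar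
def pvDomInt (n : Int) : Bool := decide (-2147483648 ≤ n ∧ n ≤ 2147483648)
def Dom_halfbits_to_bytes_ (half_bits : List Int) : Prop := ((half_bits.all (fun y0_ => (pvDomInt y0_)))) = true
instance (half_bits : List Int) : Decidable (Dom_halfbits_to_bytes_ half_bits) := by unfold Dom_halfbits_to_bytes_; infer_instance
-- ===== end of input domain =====

-- B replaces A's padded bit-string + second 8-char slicing pass by one integer
-- accumulator converted with to_bytes (objective: simpler). Both A and B pop()
-- the last element of an odd-length input; the theorems are about return values.

-- ===== PORT A =====
-- the pair loop: a 1-then-0 pair -> '1', a 0-then-1 pair -> '0'; none = ValueError (excluded by Pre_)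
def pvPairsToBits : List Int → Option (List Char)
  | [] => some []
  | [_] => none          -- trailing single element: pair == [x], ValueError
  | x :: y :: rest =>
    if x = 1 ∧ y = 0 then (pvPairsToBits rest).map (fun c => '1' :: c)
    else if x = 0 ∧ y = 1 then (pvPairsToBits rest).map (fun c => '0' :: c)
    else none

-- int(s, 2); exact for strings of '0'/'1' digits, the only ones A builds
def pvBinVal (l : List Char) : Int :=
  l.foldl (fun a c => 2 * a + (if c = '1' then 1 else 0)) 0

-- the second loop: for i in range(0, len(bits), 8): int(bits[i:i+8], 2)
def pvChunkBytes : List Char → List Int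
  | [] => []
  | c :: rest => pvBinVal (List.take 8 (c :: rest)) :: pvChunkBytes (List.drop 8 (c :: rest))
  termination_by l => l.length
  decreasing_by simp [List.length_drop]

def halfbits_to_bytes_ (half_bits : List Int) : List Int :=
  match pvPairsToBits (if half_bits.length % 2 ≠ 0 then half_bits.dropLast else half_bits) with
  | none => []           -- ValueError: excluded by Pre_
  | some bits =>
    pvChunkBytes (List.replicate ((PySem.Int.mod (-(bits.length : Int)) 8).toNat) '0' ++ bits)

-- ===== PORT B =====
-- one pass over the pairs, accumulating the value and the bit count
def pvAccPairs : List Int → Int → Nat → Option (Int × Nat)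
  | x :: y :: rest, v, n =>
    if x = 1 ∧ y = 0 then pvAccPairs rest (v * 2 + 1) (n + 1)
    else if x = 0 ∧ y = 1 then pvAccPairs rest (v * 2) (n + 1)
    else none            -- ValueError: excluded by Pre_
  | _, v, n => some (v, n)   -- zip(it, it) drops a trailing single element

-- int.to_bytes(nb, 'big'); exact for 0 ≤ v < 256^nb, which B guarantees
def pvToBytesBE (v : Int) (nb : Nat) : List Int :=
  (List.range nb).map (fun k => v / ((2 : Int) ^ (8 * (nb - 1 - k))) % 256)

def halfbits_to_bytes__alt (half_bits : List Int) : List Int :=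
  match pvAccPairs (if half_bits.length % 2 ≠ 0 then half_bits.dropLast else half_bits) 0 0 with
  | none => []           -- ValueError: excluded by Pre_
  | some (v, n) => pvToBytesBE v ((n + 7) / 8)

-- ===== PRECONDITION & SPEC =====
-- Pre_ excludes exactly the inputs on which A raises ValueError: some pair
-- (after dropping a trailing odd element) is neither 1-then-0 nor 0-then-1.
def Pre_halfbits_to_bytes_ (half_bits : List Int) : Prop :=
  let hb := if half_bits.length % 2 ≠ 0 then half_bits.dropLast else half_bits
  ∀ i ∈ List.range (hb.length / 2),
    (hb[2 * i]? = some 1 ∧ hb[2 * i + 1]? = some 0) ∨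
    (hb[2 * i]? = some 0 ∧ hb[2 * i + 1]? = some 1)
instance (half_bits : List Int) : Decidable (Pre_halfbits_to_bytes_ half_bits) := by
  unfold Pre_halfbits_to_bytes_; infer_instance

def pvWitness_halfbits_to_bytes_ : List Int := [1, 0, 0, 1, 1, 0, 0, 1, 1, 0]

def Spec_halfbits_to_bytes_ (half_bits : List Int) (out : List Int) : Prop := out = halfbits_to_bytes__alt half_bits
instance (half_bits : List Int) (out : List Int) : Decidable (Spec_halfbits_to_bytes_ half_bits out) := by unfold Spec_halfbits_to_bytes_; infer_instance

-- ===== CLAIM (what is proved, stated in full; the proofs are below) =====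
def Claim_equal_halfbits_to_bytes_ : Prop := ∀ (half_bits : List Int), Dom_halfbits_to_bytes_ half_bits → Pre_halfbits_to_bytes_ half_bits → Spec_halfbits_to_bytes_ half_bits (halfbits_to_bytes_ half_bits)

-- ===== LEMMAS AND PROOFS =====

-- Nat-valued seeded binary value, the common measure of both programs
def bvN (v : Nat) : List Char → Nat
  | [] => v
  | c :: t => bvN (2 * v + (if c = '1' then 1 else 0)) t

theorem binVal_eq_bvN (l : List Char) (v : Nat) :
    l.foldl (fun a c => 2 * a + (if c = '1' then 1 else 0)) (v : Int) = (bvN v l : Int) := by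
  induction l generalizing v with
  | nil => rfl
  | cons c t ih =>
    simp only [List.foldl_cons, bvN]
    rw [show (2 * (v : Int) + (if c = '1' then 1 else 0)) = ((2 * v + (if c = '1' then 1 else 0) : Nat) : Int) by push_cast; split <;> simp]
    exact ih _

theorem bvN_seed (l : List Char) (v : Nat) :
    bvN v l = v * 2 ^ l.length + bvN 0 l := by
  induction l generalizing v with
  | nil => simp [bvN]
  | cons c t ih =>
    simp only [bvN, List.length_cons]
    rw [ih (2 * v + _), ih (2 * 0 + _)]
    ring

theorem bvN_lt (l : List Char) : bvN 0 l < 2 ^ l.length := by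
  induction l with
  | nil => simp [bvN]
  | cons c t ih =>
    simp only [bvN, List.length_cons, Nat.mul_zero, Nat.zero_add]
    rw [bvN_seed]
    have h2 : (2 : Nat) ^ (t.length + 1) = 2 * 2 ^ t.length := by ring
    rw [h2]
    split <;> omega

theorem bvN_append (s t : List Char) (v : Nat) : bvN v (s ++ t) = bvN (bvN v s) t := by
  induction s generalizing v with
  | nil => rfl
  | cons c s ih => simp only [List.cons_append, bvN, ih]

theorem bvN_replicate_zero (p : Nat) : bvN 0 (List.replicate p '0') = 0 := by
  induction p with
  | zero => rfl
  | succ p ih => simpa [List.replicate_succ, bvN] using ih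

-- correspondence of the two pair loops
theorem accPairs_eq (l : List Int) (c : List Char) (h : pvPairsToBits l = some c)
    (v : Int) (n : Nat) :
    pvAccPairs l v n = some (c.foldl (fun a ch => 2 * a + (if ch = '1' then 1 else 0)) v, n + c.length) := by
  induction l using pvPairsToBits.induct generalizing c v n with
  | case1 =>
    simp only [pvPairsToBits, Option.some.injEq] at h
    subst h; simp [pvAccPairs]
  | case2 x => simp [pvPairsToBits] at h
  | case3 x y rest h1 ih =>
    rw [pvPairsToBits] at h
    rw [if_pos h1, Option.map_eq_some_iff] at h
    obtain ⟨c', hc', rfl⟩ := h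
    rw [pvAccPairs, if_pos h1, ih c' hc']
    simp only [List.foldl_cons, List.length_cons, Option.some.injEq, Prod.mk.injEq]
    refine ⟨?_, by omega⟩
    congr 1
    simp
    omega
  | case4 x y rest h1 h2 ih =>
    rw [pvPairsToBits] at h
    rw [if_neg h1, if_pos h2, Option.map_eq_some_iff] at h
    obtain ⟨c', hc', rfl⟩ := h
    rw [pvAccPairs, if_neg h1, if_pos h2, ih c' hc']
    simp only [List.foldl_cons, List.length_cons, Option.some.injEq, Prod.mk.injEq]
    refine ⟨?_, by omega⟩
    congr 1
    simp
    omega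
  | case5 x y rest h1 h2 =>
    rw [pvPairsToBits, if_neg h1, if_neg h2] at h
    exact absurd h (by simp)

-- Pre_ makes the pair loop succeed
theorem pairsToBits_isSome (l : List Int) (heven : l.length % 2 = 0)
    (hval : ∀ i ∈ List.range (l.length / 2),
      (l[2 * i]? = some 1 ∧ l[2 * i + 1]? = some 0) ∨
      (l[2 * i]? = some 0 ∧ l[2 * i + 1]? = some 1)) :
    (pvPairsToBits l).isSome := by
  induction l using pvPairsToBits.induct with
  | case1 => simp [pvPairsToBits]
  | case2 x => simp at heven
  | case3 x y rest h1 ih =>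
    rw [pvPairsToBits, if_pos h1, Option.isSome_map]
    apply ih
    · simp at heven; omega
    · intro i hi
      have := hval (i + 1) (by simp only [List.mem_range, List.length_cons] at hi ⊢; omega)
      simpa [List.getElem?_cons_succ, Nat.mul_add] using this
  | case4 x y rest h1 h2 ih =>
    rw [pvPairsToBits, if_neg h1, if_pos h2, Option.isSome_map]
    apply ih
    · simp at heven; omega
    · intro i hi
      have := hval (i + 1) (by simp only [List.mem_range, List.length_cons] at hi ⊢; omega)
      simpa [List.getElem?_cons_succ, Nat.mul_add] using this
  | case5 x y rest h1 h2 =>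
    have := hval 0 (by simp only [List.mem_range, List.length_cons]; omega)
    simp only [Nat.mul_zero, Nat.zero_add, List.getElem?_cons_zero, List.getElem?_cons_succ,
      Option.some.injEq] at this
    rcases this with ⟨hx, hy⟩ | ⟨hx, hy⟩
    · exact absurd ⟨hx, hy⟩ h1
    · exact absurd ⟨hx, hy⟩ h2

-- Python pad arithmetic: pad + m = 8 * ((m + 7) / 8)
theorem pad_eq (m : Nat) :
    (PySem.Int.mod (-(m : Int)) 8).toNat + m = 8 * ((m + 7) / 8) := by
  rw [PySem.Int.mod_eq_emod_of_pos (by norm_num)]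
  omega

theorem toBytes_natCast (V nb : Nat) :
    pvToBytesBE (V : Int) nb
      = (List.range nb).map (fun k => ((V / 2 ^ (8 * (nb - 1 - k)) % 256 : Nat) : Int)) := by
  unfold pvToBytesBE
  apply List.map_congr_left
  intro k _
  push_cast
  ring_nf

theorem byte_shift (A B e f : Nat) (hf : 8 ≤ f) :
    (A * 2 ^ (e + f) + B) / 2 ^ e % 256 = B / 2 ^ e % 256 := by
  have h1 : A * 2 ^ (e + f) + B = B + (A * 2 ^ f) * 2 ^ e := by ring
  rw [h1, Nat.add_mul_div_right _ _ (by positivity : 0 < 2 ^ e)]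
  have h2 : (2 : Nat) ^ f = 256 * 2 ^ (f - 8) := by
    rw [show (256 : Nat) = 2 ^ 8 from rfl, ← pow_add]
    congr 1
    omega
  have hdvd : (256 : Nat) ∣ A * 2 ^ f := ⟨A * 2 ^ (f - 8), by rw [h2]; ring⟩
  omega

theorem byte_tail (A B nb k : Nat) (hk : k < nb) :
    (A * 2 ^ (8 * nb) + B) / 2 ^ (8 * (nb + 1 - 1 - (k + 1))) % 256
      = B / 2 ^ (8 * (nb - 1 - k)) % 256 := by
  have h1 : 8 * (nb + 1 - 1 - (k + 1)) = 8 * (nb - 1 - k) := by omega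
  have h2 : 8 * nb = 8 * (nb - 1 - k) + 8 * (k + 1) := by omega
  rw [h1, h2]
  exact byte_shift _ _ _ _ (by omega)

-- core: the 8-char slicing pass equals big-endian bytes of the value
theorem chunk_eq_bytes (nb : Nat) (s : List Char) (hlen : s.length = 8 * nb) :
    pvChunkBytes s = pvToBytesBE ((bvN 0 s : Nat) : Int) nb := by
  induction nb generalizing s with
  | zero =>
    have : s = [] := List.eq_nil_of_length_eq_zero (by omega)
    subst this
    rw [pvChunkBytes.eq_1]
    simp [pvToBytesBE]
  | succ nb ih =>
    obtain ⟨a, t, rfl⟩ : ∃ a t, s = a :: t := by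
      cases s with
      | nil => simp at hlen
      | cons a t => exact ⟨a, t, rfl⟩
    rw [pvChunkBytes.eq_2]
    set s := a :: t with hs
    have hT : (s.take 8).length = 8 := by simp [hs] at hlen ⊢; omega
    have hR : (s.drop 8).length = 8 * nb := by simp [hs] at hlen ⊢; omega
    have hV : bvN 0 s = bvN 0 (s.take 8) * 2 ^ (8 * nb) + bvN 0 (s.drop 8) := by
      conv_lhs => rw [← List.take_append_drop 8 s]
      rw [bvN_append, bvN_seed, hR]
    have hAlt : bvN 0 (s.take 8) < 256 := by
      have := bvN_lt (s.take 8)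
      rw [hT] at this; norm_num at this; exact this
    have hBlt : bvN 0 (s.drop 8) < 2 ^ (8 * nb) := by
      have := bvN_lt (s.drop 8)
      rwa [hR] at this
    rw [ih (s.drop 8) hR, toBytes_natCast, toBytes_natCast, List.range_succ_eq_map,
      List.map_cons, List.map_map]
    congr 1
    · -- head byte
      have hhead : pvBinVal (s.take 8) = ((bvN 0 (s.take 8) : Nat) : Int) := by
        unfold pvBinVal
        exact binVal_eq_bvN (s.take 8) 0
      rw [hhead, hV]
      congr 1
      have hdiv : (bvN 0 (s.take 8) * 2 ^ (8 * nb) + bvN 0 (s.drop 8)) / 2 ^ (8 * nb)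
          = bvN 0 (s.take 8) := by
        rw [Nat.mul_comm, Nat.mul_add_div (by positivity : 0 < 2 ^ (8 * nb)),
          Nat.div_eq_of_lt hBlt]
        omega
      rw [show 8 * (nb + 1 - 1 - 0) = 8 * nb by omega, hdiv, Nat.mod_eq_of_lt hAlt]
    · -- tail bytes
      apply List.map_congr_left
      intro k hk
      simp only [Function.comp]
      rw [hV]
      exact congrArg (fun m : Nat => (m : Int)) (byte_tail _ _ nb k (List.mem_range.mp hk)).symm

-- even length of hb after the odd-length pop
theorem hb_even (half_bits : List Int) :
    (if half_bits.length % 2 ≠ 0 then half_bits.dropLast else half_bits).length % 2 = 0 := by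
  split
  · rw [List.length_dropLast]; omega
  · omega

-- ===== VERDICT (by name: the statement is the Claim_ definition above) =====
theorem halfbits_to_bytes__spec : Claim_equal_halfbits_to_bytes_ := by
  intro half_bits _ hpre
  unfold Spec_halfbits_to_bytes_ halfbits_to_bytes_ halfbits_to_bytes__alt
  simp only [Pre_halfbits_to_bytes_] at hpre
  set hb := (if half_bits.length % 2 ≠ 0 then half_bits.dropLast else half_bits) with hhb
  have heven : hb.length % 2 = 0 := hb_even half_bits
  obtain ⟨c, hc⟩ := Option.isSome_iff_exists.mp (pairsToBits_isSome hb heven hpre)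
  simp only [hc, accPairs_eq hb c hc 0 0]
  have hlen : (List.replicate ((PySem.Int.mod (-(c.length : Int)) 8).toNat) '0' ++ c).length
      = 8 * ((c.length + 7) / 8) := by
    have := pad_eq c.length
    simp only [List.length_append, List.length_replicate]
    omega
  rw [chunk_eq_bytes _ _ hlen, bvN_append, bvN_replicate_zero]
  have hbv := binVal_eq_bvN c 0
  rw [show ((0 : Nat) : Int) = (0 : Int) by simp] at hbv
  rw [hbv]
  norm_num
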